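-- pv_equiv track=rewrite | github.com/ali-john/Leetcode-solutions | my-folder/4258-construct-uniform-parity-array-ii/solution.py | uniformArray
-- ===== SOURCE A (Python) =====
-- def uniformArray(nums1: list[int]) -> bool:
--     n = len(nums1)
--     smallest_odd = float('inf')
--     odd = False
--     for num in nums1:
--         if num%2!=0:
--             smallest_odd = min(smallest_odd, num)
--             odd = True
--     if not odd:
--         return True
--
--     for num in nums1:
--         if num%2 == 0 and smallest_odd > num:
--             return False
--     return True
-- ===== SOURCE B (Python) =====
-- def uniformArray(nums1: list[int]) -> bool:
--     # True iff the array has no odd element, or the global minimum is odd: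
--     # if the minimum is even and an odd exists, that even is < smallest odd
--     # (parity forbids equality); if the minimum is odd, every even is >= it.
--     if not nums1:
--         return True
--     if min(nums1) % 2 != 0:
--         return True
--     return all(x % 2 == 0 for x in nums1)
-- ===== Notes on version B (the rewrite author's own statement) =====
-- stated objective: simpler
-- what changed: Instead of computing the smallest odd and rescanning for a smaller even, B uses the observation that the answer only depends on the parity of the global minimum: it is True iff there is no odd element or min(nums1) is odd.
import Mathlib
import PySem

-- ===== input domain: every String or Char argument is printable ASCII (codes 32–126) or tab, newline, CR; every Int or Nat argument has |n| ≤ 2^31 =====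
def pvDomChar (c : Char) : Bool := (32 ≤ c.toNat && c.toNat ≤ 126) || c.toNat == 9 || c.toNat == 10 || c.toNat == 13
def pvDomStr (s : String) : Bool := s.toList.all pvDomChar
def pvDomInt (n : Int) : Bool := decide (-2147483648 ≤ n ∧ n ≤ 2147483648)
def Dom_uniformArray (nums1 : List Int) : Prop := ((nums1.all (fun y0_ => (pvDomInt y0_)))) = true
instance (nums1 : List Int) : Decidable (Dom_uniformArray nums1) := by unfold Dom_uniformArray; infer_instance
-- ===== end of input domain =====

-- B is simpler: it replaces A's smallest-odd tracking plus even-rescan by a single global minimum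
-- whose parity decides the answer (True iff no odd element exists or min(nums1) is odd).

-- ===== PORT A =====
-- parity tests, Python's num % 2 (both ports test parity this way)
def pyOdd (x : Int) : Bool := PySem.Int.mod x 2 != 0
def pyEven (x : Int) : Bool := PySem.Int.mod x 2 == 0

-- first loop: smallest_odd (none = float('inf')) and the odd flag
def uaLoop1 : List Int → Option Int → Bool → Option Int × Bool
  | [], so, odd => (so, odd)
  | num :: rest, so, odd =>
    if pyOdd num then
      uaLoop1 rest (some (match so with | none => num | some m => min m num)) true
    else
      uaLoop1 rest so odd

-- second loop with early return: False on an even num with smallest_odd > num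
def uaLoop2 (so : Option Int) : List Int → Bool
  | [] => true
  | num :: rest =>
    if pyEven num && (match so with | none => true | some m => decide (m > num)) then false
    else uaLoop2 so rest

def uniformArray (nums1 : List Int) : Bool :=
  let r := uaLoop1 nums1 none false
  if !r.2 then true else uaLoop2 r.1 nums1

-- ===== PORT B =====
-- Source B: empty → True; min(nums1) odd → True; else True iff every element is even
def uniformArray_alt (nums1 : List Int) : Bool :=
  if nums1.isEmpty then true
  else if (match PySem.List.min? nums1 (fun y => y) with
           | some m => pyOdd m
           | none => false) then true
  else nums1.all pyEven

-- ===== PRECONDITION & SPEC =====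
def Spec_uniformArray (nums1 : List Int) (out : Bool) : Prop := out = uniformArray_alt nums1
instance (nums1 : List Int) (out : Bool) : Decidable (Spec_uniformArray nums1 out) := by unfold Spec_uniformArray; infer_instance

-- ===== CLAIM (what is proved, stated in full; the proofs are below) =====
def Claim_equal_uniformArray : Prop := ∀ (nums1 : List Int), Dom_uniformArray nums1 → Spec_uniformArray nums1 (uniformArray nums1)

-- ===== LEMMAS AND PROOFS =====

-- loop1's flag becomes "an odd element exists"
theorem uaLoop1_snd (nums : List Int) (so : Option Int) (odd : Bool) :
    (uaLoop1 nums so odd).2 = (odd || !(nums.filter pyOdd).isEmpty) := by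
  induction nums generalizing so odd with
  | nil => simp [uaLoop1]
  | cons num rest ih =>
    by_cases h : pyOdd num = true <;> simp [uaLoop1, h, ih]

-- loop1's min, once started, is the running foldl min over the remaining odds
theorem uaLoop1_fst_some (nums : List Int) (a : Int) (odd : Bool) :
    (uaLoop1 nums (some a) odd).1 = some ((nums.filter pyOdd).foldl min a) := by
  induction nums generalizing a odd with
  | nil => simp [uaLoop1]
  | cons num rest ih =>
    by_cases h : pyOdd num = true <;> simp [uaLoop1, h, ih]

-- loop1's min from none is min? of the odds
theorem uaLoop1_fst (nums : List Int) (odd : Bool) :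
    (uaLoop1 nums none odd).1 = PySem.List.min? (nums.filter pyOdd) (fun y => y) := by
  induction nums generalizing odd with
  | nil => simp [uaLoop1, PySem.List.min?]
  | cons num rest ih =>
    by_cases h : pyOdd num = true
    · simp [uaLoop1, h, uaLoop1_fst_some, PySem.List.min?_id_cons]
    · simp [uaLoop1, h, ih]

-- loop2 with a finite smallest_odd = "every even element is ≥ m"
theorem uaLoop2_some (m : Int) (nums : List Int) :
    uaLoop2 (some m) nums = (nums.filter pyEven).all (fun x => decide (m ≤ x)) := by
  induction nums with
  | nil => simp [uaLoop2]
  | cons num rest ih =>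
    by_cases h : pyEven num = true
    · by_cases hg : m > num
      · simp [uaLoop2, h, hg]
      · simp [uaLoop2, h, hg, ih]; intro _; omega
    · simp [uaLoop2, h, ih]

-- an element is odd exactly when it is not even
theorem pyOdd_not_even (x : Int) : pyOdd x = !pyEven x := by
  unfold pyOdd pyEven
  cases h : PySem.Int.mod x 2 == 0 <;> simp [bne] <;>
    simp [PySem.Int.mod, Int.fmod_eq_emod] at h <;> omega

-- odd and even elements are never equal
theorem pyOdd_ne_pyEven (a b : Int) (ha : pyOdd a = true) (hb : pyEven b = true) : a ≠ b := by
  intro h; subst h; rw [pyOdd_not_even, hb] at ha; simp at ha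

theorem min?_isSome_of_ne_nil (l : List Int) (h : l ≠ []) :
    ∃ m, PySem.List.min? l (fun y => y) = some m := by
  cases hh : PySem.List.min? l (fun y => y) with
  | none => exact absurd ((PySem.List.min?_eq_none_iff _ _).mp hh) h
  | some v => exact ⟨v, rfl⟩

-- ===== VERDICT (by name: the statement is the Claim_ definition above) =====
theorem uniformArray_spec : Claim_equal_uniformArray := by
  intro nums1 _
  unfold Spec_uniformArray uniformArray uniformArray_alt
  simp only [uaLoop1_snd, uaLoop1_fst, Bool.false_or, Bool.not_not]
  by_cases ho : (nums1.filter pyOdd).isEmpty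
  · -- no odd element: A returns true; every element is even, so B returns true
    have hall : nums1.all pyEven = true := by
      rw [List.all_eq_true]
      intro x hx
      by_contra hne
      have hodd : pyOdd x = true := by rw [pyOdd_not_even]; simp at hne ⊢; omega
      have : x ∈ nums1.filter pyOdd := List.mem_filter.mpr ⟨hx, hodd⟩
      rw [List.isEmpty_iff] at ho; simp [ho] at this
    simp [ho, hall]
  · -- an odd exists
    have hne : nums1.filter pyOdd ≠ [] := by simpa [List.isEmpty_iff] using ho
    obtain ⟨mo, hmo⟩ := min?_isSome_of_ne_nil _ hne
    have hmoMem : mo ∈ nums1.filter pyOdd := PySem.List.min?_mem hmo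
    have hmoOdd : pyOdd mo = true := (List.mem_filter.mp hmoMem).2
    have hmoIn : mo ∈ nums1 := (List.mem_filter.mp hmoMem).1
    have hnnil : nums1 ≠ [] := by intro h; subst h; simp at hmoIn
    obtain ⟨m, hm⟩ := min?_isSome_of_ne_nil nums1 hnnil
    have hmMem : m ∈ nums1 := PySem.List.min?_mem hm
    have hmMin : ∀ y ∈ nums1, m ≤ y := by
      intro y hy; exact PySem.List.min?_isMin hm y hy
    have hnotall : nums1.all pyEven = false := by
      rw [List.all_eq_false]
      exact ⟨mo, hmoIn, by rw [pyOdd_not_even] at hmoOdd; simpa using hmoOdd⟩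
    have ho' : (nums1.filter pyOdd).isEmpty = false := by simpa using ho
    have hE : nums1.isEmpty = false := by simpa [List.isEmpty_iff] using hnnil
    rw [hmo]
    simp only [ho', Bool.false_eq_true, if_false, uaLoop2_some, hE, hm]
    by_cases hmodd : pyOdd m = true
    · -- global min is odd → it equals mo and every even is ≥ mo
      have h1 : mo ≤ m := PySem.List.min?_isMin hmo m (List.mem_filter.mpr ⟨hmMem, hmodd⟩)
      have h2 : m ≤ mo := hmMin mo hmoIn
      have hmm : m = mo := le_antisymm h2 h1
      have hall : (nums1.filter pyEven).all (fun x => decide (mo ≤ x)) = true := by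
        rw [List.all_eq_true]
        intro x hx
        have := hmMin x (List.mem_filter.mp hx).1
        simp; omega
      simp [hmodd, hall]
    · -- global min is even → it is an even element < mo
      have hmEven : pyEven m = true := by
        rw [pyOdd_not_even] at hmodd; simpa using hmodd
      have hlt : m < mo :=
        lt_of_le_of_ne (hmMin mo hmoIn) (Ne.symm (pyOdd_ne_pyEven mo m hmoOdd hmEven))
      have hfail : (nums1.filter pyEven).all (fun x => decide (mo ≤ x)) = false := by
        rw [List.all_eq_false]
        exact ⟨m, List.mem_filter.mpr ⟨hmMem, hmEven⟩, by simp; omega⟩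
      simp [hmodd, hfail, hnotall]
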